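-- pv_equiv track=rewrite | github.com/2710165659/RougeKiller | web_crawler/web_crawler/crawl.py | extract_domain_port
-- ===== SOURCE A (Python) =====
-- def extract_domain_port(data, url):
--     # 处理协议和端口
--     url_parts = url.split('//')
--     protocol_part = url_parts[0]
--     if protocol_part == 'http:':
--         data['port'] = '80'
--     elif protocol_part == 'https:':
--         data['port'] = '443'
--     # 拆分域名部分
--     domain_part = url_parts[-1].split('?')[0]  # 去掉查询参数
--     domain_parts = domain_part.split('.')
--     # 识别顶级域名（TLD）和主域名
--     top_domain_list = ('com', 'cn', 'top', 'edu', 'net', 'org', 'gov')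
--     tld_index = -1
--     while abs(tld_index) <= len(domain_parts) and domain_parts[tld_index] in top_domain_list:
--         tld_index -= 1
--     # 主域名是 TLD 及其前一部分（如 "google.com" -> "google" + "com"）
--     if abs(tld_index) <= len(domain_parts):
--         data['domain'] = '.'.join(domain_parts[tld_index - 1:])
--     else:
--         data['domain'] = domain_part  # 如果没有匹配的 TLD，返回整个域名
--     # 子域名是主域名之前的部分（如 "sub.example.com" -> "sub"）
--     if abs(tld_index) - 1 > 0:  # 如果存在子域名
--         data['subdomain'] = '.'.join(domain_parts[:tld_index - 1])
--     else:
--         data['subdomain'] = ''  # 没有子域名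
--     return data
-- ===== SOURCE B (Python) =====
-- def extract_domain_port(data, url):
--     parts = url.split('//')
--     scheme = parts[0]
--     if scheme in ('http:', 'https:'):
--         data['port'] = '80' if scheme == 'http:' else '443'
--     host = parts[-1].split('?')[0]
--     labels = host.split('.')
--     tlds = ('com', 'cn', 'top', 'edu', 'net', 'org', 'gov')
--     # single forward pass: remember the index of the LAST label that is not a TLD
--     j = -1
--     for i, lab in enumerate(labels):
--         if lab not in tlds:
--             j = i
--     cut = max(j - 1, 0)
--     data['domain'] = '.'.join(labels[cut:])
--     data['subdomain'] = '.'.join(labels[:cut]) if j < len(labels) - 1 else ''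
--     return data
-- ===== Notes on version B (the rewrite author's own statement) =====
-- stated objective: simpler
-- what changed: A scans backward from the end with a negative index while-loop to count trailing TLD labels and then branches three ways; B makes one forward pass recording the index of the last non-TLD label and derives the cut point and both slices directly from that index, with no all-TLD special branch.
import Mathlib
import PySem

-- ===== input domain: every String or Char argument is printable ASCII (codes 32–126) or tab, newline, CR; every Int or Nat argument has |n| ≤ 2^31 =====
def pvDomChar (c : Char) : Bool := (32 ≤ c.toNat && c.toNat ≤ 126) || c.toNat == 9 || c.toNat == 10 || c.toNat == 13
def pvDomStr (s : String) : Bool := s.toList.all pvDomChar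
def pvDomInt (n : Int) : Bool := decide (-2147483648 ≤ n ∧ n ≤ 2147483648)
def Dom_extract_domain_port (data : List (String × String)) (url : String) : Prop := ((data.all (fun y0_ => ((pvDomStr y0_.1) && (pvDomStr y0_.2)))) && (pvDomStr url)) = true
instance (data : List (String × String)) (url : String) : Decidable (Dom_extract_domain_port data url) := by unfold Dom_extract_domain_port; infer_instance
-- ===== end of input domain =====

-- B replaces A's backward negative-index TLD while-loop and its all-TLD special branch
-- by a single forward pass that records the index of the last non-TLD label, deriving
-- the cut point and both slices from that index; objective: simpler.  Python A mutates
-- `data` in place; the equivalence proved here is about the returned association list.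

-- ===== PORT A =====
-- the TLD tuple, shared verbatim by both Pythons
def tldsA : List String := ["com", "cn", "top", "edu", "net", "org", "gov"]

-- the while loop `while abs(tld_index) <= len(domain_parts) and domain_parts[tld_index] in top_domain_list: tld_index -= 1`
-- fuel = length + 1 suffices: tld_index starts at -1 and |tld_index| grows by 1 each iteration, bounded by length.
def aLoop (parts : List String) : Nat → Int → Int
  | 0, t => t
  | fuel + 1, t =>
    if t.natAbs ≤ parts.length then
      match PySem.List.pyGet? parts t with
      | some x => if x ∈ tldsA then aLoop parts fuel (t - 1) else t
      | none => t          -- unreachable: |t| ≤ length and t < 0 means the index is valid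
    else t

def extract_domain_port (data : List (String × String)) (url : String) : List (String × String) :=
  -- url.split('//') : sep nonempty, so split never fails; Chars.splitOn is the exact semantics
  let url_parts := (PySem.Chars.splitOn url.toList ['/', '/']).map String.ofList
  let protocol_part := url_parts.headD ""       -- url_parts[0]; split always returns a nonempty list
  let data1 :=
    if protocol_part = "http:" then PySem.Dict.insert (PySem.Dict.mk data) "port" "80"
    else if protocol_part = "https:" then PySem.Dict.insert (PySem.Dict.mk data) "port" "443"
    else PySem.Dict.mk data
  let last := (PySem.List.pyGet? url_parts (-1)).getD ""   -- url_parts[-1]; nonempty, so exact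
  let domain_part := ((PySem.Chars.splitOn last.toList ['?']).map String.ofList).headD ""  -- split('?')[0]
  let domain_parts := (PySem.Chars.splitOn domain_part.toList ['.']).map String.ofList
  let tld_index := aLoop domain_parts (domain_parts.length + 1) (-1)
  let data2 :=
    if tld_index.natAbs ≤ domain_parts.length then
      PySem.Dict.insert data1 "domain"
        (PySem.Str.join "." (PySem.List.slice domain_parts (some (tld_index - 1)) none))
    else
      PySem.Dict.insert data1 "domain" domain_part
  if (tld_index.natAbs : Int) - 1 > 0 then
    (PySem.Dict.insert data2 "subdomain"
      (PySem.Str.join "." (PySem.List.slice domain_parts none (some (tld_index - 1))))).items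
  else
    (PySem.Dict.insert data2 "subdomain" "").items

-- ===== PORT B =====
-- `j = -1; for i, lab in enumerate(labels): if lab not in tlds: j = i`
def bLastNon (labels : List String) : Int :=
  (PySem.List.enumerate labels 0).foldl (fun j p => if ¬ (p.2 ∈ tldsA) then p.1 else j) (-1)

def extract_domain_port_alt (data : List (String × String)) (url : String) : List (String × String) :=
  let parts := (PySem.Chars.splitOn url.toList ['/', '/']).map String.ofList
  let scheme := parts.headD ""
  let data1 :=
    if scheme = "http:" ∨ scheme = "https:" then
      PySem.Dict.insert (PySem.Dict.mk data) "port" (if scheme = "http:" then "80" else "443")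
    else PySem.Dict.mk data
  let host := ((PySem.Chars.splitOn ((PySem.List.pyGet? parts (-1)).getD "").toList ['?']).map String.ofList).headD ""
  let labels := (PySem.Chars.splitOn host.toList ['.']).map String.ofList
  let j := bLastNon labels
  let cut := max (j - 1) 0
  let data2 := PySem.Dict.insert data1 "domain"
    (PySem.Str.join "." (PySem.List.slice labels (some cut) none))
  (PySem.Dict.insert data2 "subdomain"
    (if j < (labels.length : Int) - 1 then PySem.Str.join "." (PySem.List.slice labels none (some cut)) else "")).items

-- ===== PRECONDITION & SPEC =====
def Spec_extract_domain_port (data : List (String × String)) (url : String) (out : List (String × String)) : Prop := out = extract_domain_port_alt data url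
instance (data : List (String × String)) (url : String) (out : List (String × String)) : Decidable (Spec_extract_domain_port data url out) := by unfold Spec_extract_domain_port; infer_instance

-- ===== CLAIM (what is proved, stated in full; the proofs are below) =====
def Claim_equal_extract_domain_port : Prop := ∀ (data : List (String × String)) (url : String), Dom_extract_domain_port data url → Spec_extract_domain_port data url (extract_domain_port data url)

-- ===== LEMMAS AND PROOFS =====

-- proof-side helper: the number of trailing TLD labels, computed on the reversed list
def ctR : List String → Nat
  | [] => 0
  | x :: xs => if x ∈ tldsA then ctR xs + 1 else 0

-- proof-side helper: A's backward loop rephrased as a forward counter (the common spec)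
def bCount (labels : List String) : Nat → Nat → Nat
  | k, 0 => k
  | k, fuel + 1 =>
    if k < labels.length ∧ (PySem.List.pyGet? labels (-(k : Int) - 1)).getD "" ∈ tldsA then
      bCount labels (k + 1) fuel
    else k

theorem natAbs_negSucc' (i : Nat) : ((-(i : Int) - 1)).natAbs = i + 1 := by omega

theorem pyGet?_neg (parts : List String) (i : Nat) (h : i < parts.length) :
    PySem.List.pyGet? parts (-(i : Int) - 1) = parts[parts.length - 1 - i]? := by
  simp only [PySem.List.pyGet?, PySem.List.pyIdx?]
  rw [if_neg (by omega), if_pos (by omega)]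
  have : (((i : Int)) + 1).toNat = i + 1 := by omega
  simp only [show -(i:Int)-1 = -((i:Int)+1) by ring, Int.neg_neg, this, Option.bind_some]
  congr 1
  omega

theorem aLoop_eq_bCount (parts : List String) :
    ∀ (fuelA fuelB i : Nat), parts.length - i < fuelA → parts.length - i ≤ fuelB →
      aLoop parts fuelA (-(i : Int) - 1) = -(bCount parts i fuelB : Int) - 1 := by
  intro fuelA
  induction fuelA with
  | zero => intro fuelB i hA hB; omega
  | succ fA ih =>
    intro fuelB i hA hB
    by_cases hlen : i < parts.length
    · obtain ⟨x, hx⟩ : ∃ x, parts[parts.length - 1 - i]? = some x :=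
        ⟨parts[parts.length - 1 - i]'(by omega), List.getElem?_eq_getElem (by omega)⟩
      have hget : PySem.List.pyGet? parts (-(i : Int) - 1) = some x := by
        rw [pyGet?_neg parts i hlen, hx]
      cases fuelB with
      | zero => omega
      | succ fB =>
        by_cases hmem : x ∈ tldsA
        · have hrec : aLoop parts (fA + 1) (-(i : Int) - 1)
              = aLoop parts fA (-((i + 1 : Nat) : Int) - 1) := by
            simp only [aLoop, natAbs_negSucc', hget]
            rw [if_pos (by omega), if_pos hmem]
            congr 1; push_cast; ring
          have hrecB : bCount parts i (fB + 1) = bCount parts (i + 1) fB := by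
            simp only [bCount]
            rw [if_pos ⟨hlen, by rw [hget]; exact hmem⟩]
          rw [hrec, hrecB]
          exact ih fB (i + 1) (by omega) (by omega)
        · have h1 : aLoop parts (fA + 1) (-(i : Int) - 1) = -(i : Int) - 1 := by
            simp only [aLoop, natAbs_negSucc', hget]
            rw [if_pos (by omega), if_neg hmem]
          have h2 : bCount parts i (fB + 1) = i := by
            simp only [bCount]
            rw [if_neg (by rw [hget]; exact fun h => hmem h.2)]
          rw [h1, h2]
    · have h1 : aLoop parts (fA + 1) (-(i : Int) - 1) = -(i : Int) - 1 := by
        simp only [aLoop, natAbs_negSucc']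
        rw [if_neg (by omega)]
      have h2 : ∀ fB, bCount parts i fB = i := by
        intro fB; cases fB with
        | zero => rfl
        | succ fB => simp only [bCount]; rw [if_neg (fun h => hlen h.1)]
      rw [h1, h2]

-- appending one label: the backward counter shifts by one when the new last label is a TLD
theorem bCount_shift (xs : List String) (x : String) :
    ∀ (fuel k : Nat), bCount (xs ++ [x]) (k + 1) fuel = bCount xs k fuel + 1 := by
  intro fuel
  induction fuel with
  | zero => intro k; rfl
  | succ f ih =>
    intro k
    simp only [bCount]
    by_cases hk : k < xs.length
    · have hidx : PySem.List.pyGet? (xs ++ [x]) (-((k + 1 : Nat) : Int) - 1)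
          = PySem.List.pyGet? xs (-(k : Int) - 1) := by
        rw [pyGet?_neg (xs ++ [x]) (k + 1) (by simp; omega), pyGet?_neg xs k hk]
        rw [List.getElem?_append_left (by simp; omega)]
        congr 1; simp; omega
      by_cases hmem : (PySem.List.pyGet? xs (-(k : Int) - 1)).getD "" ∈ tldsA
      · rw [if_pos ⟨by simp; omega, by rw [hidx]; exact hmem⟩,
            if_pos ⟨hk, hmem⟩]
        exact ih (k + 1)
      · rw [if_neg (by rintro ⟨-, h⟩; rw [hidx] at h; exact hmem h),
            if_neg (by rintro ⟨-, h⟩; exact hmem h)]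
    · rw [if_neg (by simp; omega), if_neg (by rintro ⟨h, -⟩; exact hk h)]

theorem bCount_eq_ctR (xs : List String) : bCount xs 0 xs.length = ctR xs.reverse := by
  induction xs using List.reverseRecOn with
  | nil => rfl
  | append_singleton xs x ih =>
    have hlen : (xs ++ [x]).length = xs.length + 1 := by simp
    rw [hlen]
    simp only [bCount]
    have hget : PySem.List.pyGet? (xs ++ [x]) (-((0 : Nat) : Int) - 1) = some x := by
      rw [pyGet?_neg (xs ++ [x]) 0 (by simp)]
      rw [List.getElem?_append_right (by simp)]
      simp
    rw [List.reverse_append]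
    simp only [List.reverse_singleton, List.singleton_append, ctR]
    by_cases hmem : x ∈ tldsA
    · rw [if_pos ⟨by simp, by rw [hget]; exact hmem⟩, if_pos hmem]
      rw [show (0 : Nat) + 1 = 0 + 1 from rfl, bCount_shift xs x xs.length 0, ih]
    · rw [if_neg (by rintro ⟨-, h⟩; rw [hget] at h; exact hmem h), if_neg hmem]

theorem ctR_le (xs : List String) : ctR xs ≤ xs.length := by
  induction xs with
  | nil => simp [ctR]
  | cons x xs ih => simp only [ctR, List.length_cons]; split <;> omega

-- B's forward pass computes length - 1 - (trailing TLD count), uniformly (-1 when all labels are TLDs)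
theorem bLastNon_eq (labels : List String) :
    bLastNon labels = (labels.length : Int) - 1 - (ctR labels.reverse : Int) := by
  unfold bLastNon
  induction labels using List.reverseRecOn with
  | nil => rfl
  | append_singleton xs x ih =>
    rw [PySem.List.enumerate_append, List.foldl_append]
    simp only [PySem.List.enumerate_cons, PySem.List.enumerate_nil, List.foldl_cons, List.foldl_nil]
    rw [List.reverse_append]
    simp only [List.reverse_singleton, List.singleton_append, ctR, List.length_append,
      List.length_singleton]
    by_cases hmem : x ∈ tldsA
    · rw [if_neg (by simp [hmem]), if_pos hmem, ih]
      push_cast; ring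
    · rw [if_pos (by simp [hmem]), if_neg hmem]
      push_cast; ring

-- sep.join(s.split(sep)) == s for nonempty sep
theorem join_append_pair (sep a b : List Char) :
    ∀ (xs : List (List Char)),
    PySem.Chars.join sep (xs ++ [a, b]) = PySem.Chars.join sep (xs ++ [a ++ sep ++ b]) := by
  intro xs
  induction xs with
  | nil => simp [PySem.Chars.join_cons_cons, PySem.Chars.join_singleton, List.append_assoc]
  | cons x xs ih =>
    cases xs with
    | nil => simp [PySem.Chars.join_cons_cons, PySem.Chars.join_singleton, List.append_assoc]
    | cons y ys =>
      simp only [List.cons_append, PySem.Chars.join_cons_cons] at *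
      rw [ih]

theorem go_join (sep : List Char) (hsep : sep ≠ []) :
    ∀ (fuel : Nat) (l cur : List Char) (acc : List (List Char)), l.length ≤ fuel →
      PySem.Chars.join sep (PySem.Chars.splitOn.go sep fuel l cur acc)
        = PySem.Chars.join sep (acc.reverse ++ [cur.reverse ++ l]) := by
  intro fuel
  induction fuel with
  | zero =>
    intro l cur acc h
    have : l = [] := by cases l <;> simp_all
    subst this
    rw [PySem.Chars.splitOn.go]
    simp
  | succ f ih =>
    intro l cur acc h
    cases l with
    | nil =>
      rw [PySem.Chars.splitOn.go]
      · simp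
      · omega
    | cons c rest =>
      rw [PySem.Chars.splitOn.go]
      by_cases hp : sep.isPrefixOf (c :: rest)
      · rw [if_pos hp]
        obtain ⟨t, ht⟩ := (List.isPrefixOf_iff_prefix.mp hp)
        have hdrop : (c :: rest).drop sep.length = t := by rw [← ht, List.drop_left]
        have hsl : 1 ≤ sep.length := by
          cases sep with
          | nil => exact absurd rfl hsep
          | cons s ss => simp
        have hlen : t.length ≤ f := by
          have hl := congrArg List.length ht
          simp at hl h
          omega
        rw [ih _ _ _ (by rw [hdrop]; exact hlen)]
        rw [hdrop]
        simp only [List.reverse_cons, List.reverse_nil, List.nil_append, List.append_assoc]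
        rw [show acc.reverse ++ ([cur.reverse] ++ [t]) = acc.reverse ++ [cur.reverse, t] from rfl]
        rw [join_append_pair]
        rw [← ht]
        simp [List.append_assoc]
      · rw [if_neg hp]
        rw [ih _ _ _ (by simp at h ⊢; omega)]
        simp [List.append_assoc]

theorem join_splitOn (sep : List Char) (h : sep ≠ []) (cs : List Char) :
    PySem.Chars.join sep (PySem.Chars.splitOn cs sep) = cs := by
  rw [PySem.Chars.splitOn]
  rw [go_join sep h _ _ _ _ (by omega)]
  simp [PySem.Chars.join_singleton]

theorem join_labels (dp : String) :
    PySem.Str.join "." ((PySem.Chars.splitOn dp.toList ['.']).map String.ofList) = dp := by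
  rw [PySem.Str.join]
  simp only [List.map_map, Function.comp_def, String.toList_ofList, List.map_id']
  rw [show ".".toList = ['.'] from rfl]
  rw [join_splitOn ['.'] (by simp) dp.toList]
  exact String.ofList_toList

-- everything after the protocol/port step agrees, for any dict state d1 and host string dp
theorem rest_eq (d1 : PySem.Dict String String) (dp : String) :
    (if ((aLoop ((PySem.Chars.splitOn dp.toList ['.']).map String.ofList) (((PySem.Chars.splitOn dp.toList ['.']).map String.ofList).length + 1) (-1)).natAbs : Int) - 1 > 0 then
       PySem.Dict.items (PySem.Dict.insert
         (if (aLoop ((PySem.Chars.splitOn dp.toList ['.']).map String.ofList) (((PySem.Chars.splitOn dp.toList ['.']).map String.ofList).length + 1) (-1)).natAbs ≤ ((PySem.Chars.splitOn dp.toList ['.']).map String.ofList).length then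
            PySem.Dict.insert d1 "domain" (PySem.Str.join "." (PySem.List.slice ((PySem.Chars.splitOn dp.toList ['.']).map String.ofList) (some (aLoop ((PySem.Chars.splitOn dp.toList ['.']).map String.ofList) (((PySem.Chars.splitOn dp.toList ['.']).map String.ofList).length + 1) (-1) - 1)) none))
          else PySem.Dict.insert d1 "domain" dp)
         "subdomain" (PySem.Str.join "." (PySem.List.slice ((PySem.Chars.splitOn dp.toList ['.']).map String.ofList) none (some (aLoop ((PySem.Chars.splitOn dp.toList ['.']).map String.ofList) (((PySem.Chars.splitOn dp.toList ['.']).map String.ofList).length + 1) (-1) - 1)))))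
     else
       PySem.Dict.items (PySem.Dict.insert
         (if (aLoop ((PySem.Chars.splitOn dp.toList ['.']).map String.ofList) (((PySem.Chars.splitOn dp.toList ['.']).map String.ofList).length + 1) (-1)).natAbs ≤ ((PySem.Chars.splitOn dp.toList ['.']).map String.ofList).length then
            PySem.Dict.insert d1 "domain" (PySem.Str.join "." (PySem.List.slice ((PySem.Chars.splitOn dp.toList ['.']).map String.ofList) (some (aLoop ((PySem.Chars.splitOn dp.toList ['.']).map String.ofList) (((PySem.Chars.splitOn dp.toList ['.']).map String.ofList).length + 1) (-1) - 1)) none))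
          else PySem.Dict.insert d1 "domain" dp)
         "subdomain" ""))
    =
    (PySem.Dict.insert
      (PySem.Dict.insert d1 "domain" (PySem.Str.join "." (PySem.List.slice ((PySem.Chars.splitOn dp.toList ['.']).map String.ofList) (some (max (bLastNon ((PySem.Chars.splitOn dp.toList ['.']).map String.ofList) - 1) 0)) none)))
      "subdomain"
      (if bLastNon ((PySem.Chars.splitOn dp.toList ['.']).map String.ofList) < (((PySem.Chars.splitOn dp.toList ['.']).map String.ofList).length : Int) - 1 then
         PySem.Str.join "." (PySem.List.slice ((PySem.Chars.splitOn dp.toList ['.']).map String.ofList) none (some (max (bLastNon ((PySem.Chars.splitOn dp.toList ['.']).map String.ofList) - 1) 0)))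
       else "")).items := by
  have hdp := join_labels dp
  generalize hL : (PySem.Chars.splitOn dp.toList ['.']).map String.ofList = L at *
  have hk : aLoop L (L.length + 1) (-1) = -(ctR L.reverse : Int) - 1 := by
    have h1 := aLoop_eq_bCount L (L.length + 1) L.length 0 (by omega) (by omega)
    norm_num at h1
    rw [h1, bCount_eq_ctR]
  have hj : bLastNon L = (L.length : Int) - 1 - (ctR L.reverse : Int) := bLastNon_eq L
  generalize hkdef : ctR L.reverse = k at *
  have hkle : k ≤ L.length := by
    rw [← hkdef]
    calc ctR L.reverse ≤ L.reverse.length := ctR_le L.reverse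
    _ = L.length := by simp
  have hna : ((-(k : Int) - 1)).natAbs = k + 1 := by omega
  have hm1 : (-(k : Int) - 1) - 1 = -((k + 2 : Nat) : Int) := by push_cast; ring
  have hcut : max ((L.length : Int) - 1 - (k : Int) - 1) 0 = ((L.length - (k + 2) : Nat) : Int) := by omega
  rw [hk, hj, hna, hm1, hcut]
  rw [PySem.List.slice_from_neg_natCast L (k + 2) (by omega),
      PySem.List.slice_from_natCast L (L.length - (k + 2)),
      PySem.List.slice_to_neg_natCast L (k + 2) (by omega),
      PySem.List.slice_to_natCast L (L.length - (k + 2))]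
  have hall : k = L.length → PySem.Str.join "." (L.drop (L.length - (k + 2))) = dp := by
    intro h; subst h; rw [Nat.sub_eq_zero_of_le (by omega), List.drop_zero]; exact hdp
  have hnil : L = [] → dp = "" := by
    intro h; subst h; rw [← hdp]; rfl
  split_ifs with h1 h2 h3 h3 h2 h3 h3
  · rfl
  · omega
  · -- all-TLD branch: k = length > 0, the unclamped slice is the whole list
    rw [hall (by omega)]
  · omega
  · omega
  · rfl
  · omega
  · -- k = 0 and L = []: both domains are the empty string
    have hL0 : L = [] := by
      cases L with
      | nil => rfl
      | cons a l => exfalso; simp at h2; omega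
    subst hL0
    rw [hnil rfl, List.drop_nil]
    rfl

-- ===== VERDICT (by name: the statement is the Claim_ definition above) =====
theorem scheme_eq (data : List (String × String)) (p : String) :
    (if p = "http:" ∨ p = "https:" then
       PySem.Dict.insert (PySem.Dict.mk data) "port" (if p = "http:" then "80" else "443")
     else PySem.Dict.mk data)
    = (if p = "http:" then PySem.Dict.insert (PySem.Dict.mk data) "port" "80"
       else if p = "https:" then PySem.Dict.insert (PySem.Dict.mk data) "port" "443"
       else PySem.Dict.mk data) := by
  by_cases h1 : p = "http:"
  · subst h1; simp
  · by_cases h2 : p = "https:"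
    · subst h2; simp [h1]
    · simp [h1, h2]

theorem extract_domain_port_spec : Claim_equal_extract_domain_port := by
  intro data url _
  show extract_domain_port data url = extract_domain_port_alt data url
  simp only [extract_domain_port, extract_domain_port_alt]
  rw [scheme_eq]
  exact rest_eq _ _
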